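-- pv_equiv track=rewrite | github.com/sodic/nimstuff | work/pileup/makeBam.py | cigar
-- ===== SOURCE A (Python) =====
-- def cigar(read, ref):
--     cigar = ""
--     index = 0
--     limit = len(read)
--     while index < limit:
--         if read[index] == "-" and ref[index] == "-":
--             index += 1
--             continue
--
--         start = index
--         letter = None
--         if read[index] == "-":
--             letter = "D"
--             while index < limit and read[index] == "-" and ref[index] != "-":
--                 index += 1
--
--         elif ref[index] == "-":
--             letter = "I"
--             while index < limit and ref[index] == "-" and read[index] != "-":
--                 index += 1
--
--         else:
--             letter = "M"
--             while index < limit and ref[index] != "-" and read[index] != "-":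
--                 index += 1
--
--         cigar += f"{index - start   }{letter}"
--
--     return cigar
-- ===== SOURCE B (Python) =====
-- def cigar(read, ref):
--     def merge(left, right):
--         if left and right and left[-1][1] == right[0][1]:
--             return left[:-1] + [(left[-1][0] + right[0][0], left[-1][1])] + right[1:]
--         return left + right
--
--     def runs(lo, hi):
--         if hi - lo == 0:
--             return []
--         if hi - lo == 1:
--             if read[lo] == "-":
--                 c = "." if ref[lo] == "-" else "D"
--             else:
--                 c = "I" if ref[lo] == "-" else "M"
--             return [(1, c)]
--         mid = (lo + hi) // 2
--         return merge(runs(lo, mid), runs(mid, hi))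
--
--     return "".join(f"{n}{c}" for n, c in runs(0, len(read)) if c != ".")
-- ===== Notes on version B (the rewrite author's own statement) =====
-- stated objective: alternative
-- what changed: Replaces A's sequential scan with three letter-specific inner while loops by a divide-and-conquer recursion: split the index range in half, compute each half's run list ((count,letter) pairs, with a marker run for both-gap columns), merge the two lists by coalescing the boundary runs when their letters agree, and format the non-marker runs at the end.
import Mathlib
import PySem

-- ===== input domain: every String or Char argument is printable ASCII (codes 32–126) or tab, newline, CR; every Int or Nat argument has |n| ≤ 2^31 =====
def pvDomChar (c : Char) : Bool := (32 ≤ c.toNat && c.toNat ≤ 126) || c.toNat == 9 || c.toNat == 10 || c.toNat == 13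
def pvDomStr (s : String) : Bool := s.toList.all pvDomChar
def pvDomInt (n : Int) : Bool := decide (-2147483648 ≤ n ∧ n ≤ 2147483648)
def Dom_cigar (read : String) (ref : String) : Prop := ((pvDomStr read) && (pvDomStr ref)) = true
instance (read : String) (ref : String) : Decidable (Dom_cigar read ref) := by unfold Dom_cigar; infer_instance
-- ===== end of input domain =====

-- B replaces A's sequential scan (outer while + three letter-specific inner whiles) by a
-- divide-and-conquer recursion: halve the index range, build each half's run list, merge at the
-- boundary, format at the end; objective: alternative. Return-value equivalence on Pre_
-- (outside Pre_ both A and B raise IndexError).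

-- ===== PORT A =====
-- while loops become structural recursion on a fuel that bounds the remaining iterations
-- (fuel = limit - index suffices: each iteration advances index by at least 1);
-- indexing: inside Pre_ every access is in range, so List.getD is exact here.
def cigarLoopD (rd rf : List Char) (limit : Nat) : Nat → Nat → Nat
  | 0, i => i
  | fuel + 1, i =>
      if i < limit ∧ rd.getD i ' ' = '-' ∧ rf.getD i ' ' ≠ '-' then
        cigarLoopD rd rf limit fuel (i + 1)
      else i

def cigarLoopI (rd rf : List Char) (limit : Nat) : Nat → Nat → Nat
  | 0, i => i
  | fuel + 1, i =>
      if i < limit ∧ rf.getD i ' ' = '-' ∧ rd.getD i ' ' ≠ '-' then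
        cigarLoopI rd rf limit fuel (i + 1)
      else i

def cigarLoopM (rd rf : List Char) (limit : Nat) : Nat → Nat → Nat
  | 0, i => i
  | fuel + 1, i =>
      if i < limit ∧ rf.getD i ' ' ≠ '-' ∧ rd.getD i ' ' ≠ '-' then
        cigarLoopM rd rf limit fuel (i + 1)
      else i

def cigarLoop (rd rf : List Char) (limit : Nat) : Nat → Nat → String → String
  | 0, _, acc => acc
  | fuel + 1, i, acc =>
      if i < limit then
        if rd.getD i ' ' = '-' ∧ rf.getD i ' ' = '-' then
          cigarLoop rd rf limit fuel (i + 1) acc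
        else if rd.getD i ' ' = '-' then
          cigarLoop rd rf limit fuel (cigarLoopD rd rf limit (limit - i) i)
            (acc ++ PySem.Int.toStr ((cigarLoopD rd rf limit (limit - i) i : Int) - (i : Int)) ++ "D")
        else if rf.getD i ' ' = '-' then
          cigarLoop rd rf limit fuel (cigarLoopI rd rf limit (limit - i) i)
            (acc ++ PySem.Int.toStr ((cigarLoopI rd rf limit (limit - i) i : Int) - (i : Int)) ++ "I")
        else
          cigarLoop rd rf limit fuel (cigarLoopM rd rf limit (limit - i) i)
            (acc ++ PySem.Int.toStr ((cigarLoopM rd rf limit (limit - i) i : Int) - (i : Int)) ++ "M")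
      else acc

def cigar (read : String) (ref : String) : String :=
  cigarLoop read.toList ref.toList read.toList.length read.toList.length 0 ""

-- ===== PORT B =====
-- Source B's merge(left, right): coalesce the boundary runs when their letters agree
-- ('left and right and left[-1][1] == right[0][1]' is the match on getLast? and the head)
def mergeRuns (left right : List (Nat × Char)) : List (Nat × Char) :=
  match left.getLast?, right with
  | some l, r0 :: rtl =>
      if l.2 = r0.2 then left.dropLast ++ [(l.1 + r0.1, l.2)] ++ rtl
      else left ++ right
  | _, _ => left ++ right

-- Source B's runs(lo, hi): divide and conquer over the index range
def dcRuns (rd rf : List Char) (lo hi : Nat) : List (Nat × Char) :=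
  if hi - lo = 0 then []
  else if hi - lo = 1 then
    [(1, if rd.getD lo ' ' = '-' then (if rf.getD lo ' ' = '-' then '.' else 'D')
         else (if rf.getD lo ' ' = '-' then 'I' else 'M'))]
  else
    mergeRuns (dcRuns rd rf lo ((lo + hi) / 2)) (dcRuns rd rf ((lo + hi) / 2) hi)
termination_by hi - lo
decreasing_by all_goals omega

def cigar_alt (read : String) (ref : String) : String :=
  String.join
    (((dcRuns read.toList ref.toList 0 read.toList.length).filter
        (fun p => p.2 != '.')).map
      (fun p => PySem.Int.toStr (p.1 : Int) ++ String.singleton p.2))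

-- ===== PRECONDITION & SPEC =====
-- Pre_ excludes exactly the inputs where A raises IndexError (ref shorter than read);
-- B raises IndexError there too.
def Pre_cigar (read : String) (ref : String) : Prop :=
  read.toList.length ≤ ref.toList.length
instance (read : String) (ref : String) : Decidable (Pre_cigar read ref) := by
  unfold Pre_cigar; infer_instance

def pvWitness_cigar : String × String := ("ab-c", "a--c")

def Spec_cigar (read : String) (ref : String) (out : String) : Prop := out = cigar_alt read ref
instance (read : String) (ref : String) (out : String) : Decidable (Spec_cigar read ref out) := by
  unfold Spec_cigar; infer_instance

-- ===== CLAIM (what is proved, stated in full; the proofs are below) =====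
def Claim_equal_cigar : Prop := ∀ (read : String) (ref : String), Dom_cigar read ref → Pre_cigar read ref → Spec_cigar read ref (cigar read ref)

-- ===== LEMMAS AND PROOFS =====

-- per-column code: 'M'/'I'/'D', '.' for a both-gap column
def codeAt (rd rf : List Char) (i : Nat) : Char :=
  if rd.getD i ' ' = '-' then (if rf.getD i ' ' = '-' then '.' else 'D')
  else (if rf.getD i ' ' = '-' then 'I' else 'M')

-- the code list of columns i, i+1, …, limit-1
def cfrom (rd rf : List Char) (limit i : Nat) : List Char :=
  (List.range' i (limit - i)).map (codeAt rd rf)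

theorem cfrom_cons (rd rf : List Char) (limit i : Nat) (h : i < limit) :
    cfrom rd rf limit i = codeAt rd rf i :: cfrom rd rf limit (i + 1) := by
  unfold cfrom
  have h1 : limit - i = (limit - (i + 1)) + 1 := by omega
  rw [h1, List.range'_succ, List.map_cons]

theorem cfrom_nil (rd rf : List Char) (limit i : Nat) (h : ¬ i < limit) :
    cfrom rd rf limit i = [] := by
  unfold cfrom
  have h1 : limit - i = 0 := by omega
  rw [h1]; rfl

theorem cfrom_add (rd rf : List Char) (limit : Nat) (k : Nat) : ∀ i,
    cfrom rd rf limit (i + k) = (cfrom rd rf limit i).drop k := by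
  induction k with
  | zero => intro i; simp
  | succ k ih =>
      intro i
      by_cases h : i < limit
      · rw [cfrom_cons rd rf limit i h]
        have : i + (k + 1) = (i + 1) + k := by omega
        rw [this, ih (i + 1)]
        rfl
      · rw [cfrom_nil rd rf limit i h, cfrom_nil rd rf limit (i + (k + 1)) (by omega)]
        simp

theorem cfrom_split (rd rf : List Char) (lo mid hi : Nat) (h1 : lo ≤ mid) (h2 : mid ≤ hi) :
    cfrom rd rf mid lo ++ cfrom rd rf hi mid = cfrom rd rf hi lo := by
  unfold cfrom
  rw [← List.map_append]
  congr 1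
  have h3 : hi - lo = (mid - lo) + (hi - mid) := by omega
  rw [h3, ← List.range'_append]
  congr 2
  omega

theorem dropWhile_eq_drop {α : Type} (p : α → Bool) (l : List α) :
    l.dropWhile p = l.drop (l.takeWhile p).length := by
  induction l with
  | nil => rfl
  | cons a t ih =>
      by_cases h : p a
      · simp [h, ih]
      · simp [h]

theorem str_foldl_append (l : List String) (a : String) :
    l.foldl (· ++ ·) a = a ++ l.foldl (· ++ ·) "" := by
  induction l generalizing a with
  | nil => simp
  | cons x t ih =>
      simp only [List.foldl_cons]
      rw [ih (a ++ x), ih ("" ++ x)]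
      simp [String.append_assoc]

theorem join_cons (a : String) (l : List String) :
    String.join (a :: l) = a ++ String.join l := by
  unfold String.join
  simp only [List.foldl_cons]
  rw [str_foldl_append]
  simp

theorem empty_append_str (s : String) : "" ++ s = s := by
  simp

-- run-length process of a code list (fuel-irrelevant once fuel covers the length)
def procCodes : Nat → List Char → String
  | 0, _ => ""
  | _, [] => ""
  | fuel + 1, c :: rest =>
      (if c = '.' then "" else
        PySem.Int.toStr ((1 + (rest.takeWhile (· = c)).length : Nat) : Int) ++ String.singleton c)
      ++ procCodes fuel (rest.dropWhile (· = c))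

theorem procCodes_fuel : ∀ (f : Nat) (l : List Char) (f' : Nat),
    l.length ≤ f → l.length ≤ f' → procCodes f l = procCodes f' l := by
  intro f
  induction f with
  | zero =>
      intro l f' h _
      have : l = [] := by cases l with | nil => rfl | cons a t => simp at h
      subst this
      cases f' <;> rfl
  | succ f ih =>
      intro l f' h h'
      cases l with
      | nil => cases f' <;> rfl
      | cons c rest =>
          cases f' with
          | zero => simp at h'
          | succ f' =>
              rw [procCodes, procCodes]
              have hd : (rest.dropWhile (· = c)).length ≤ rest.length :=
                List.length_dropWhile_le _ rest
              rw [ih (rest.dropWhile (· = c)) f' (by simp at h; omega) (by simp at h'; omega)]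

def procC (l : List Char) : String := procCodes l.length l

theorem procC_nil : procC [] = "" := rfl

theorem procC_cons (c : Char) (l : List Char) :
    procC (c :: l) =
      (if c = '.' then "" else
        PySem.Int.toStr ((1 + (l.takeWhile (· = c)).length : Nat) : Int) ++ String.singleton c)
      ++ procC (l.dropWhile (· = c)) := by
  unfold procC
  simp only [List.length_cons]
  rw [procCodes]
  congr 1
  exact procCodes_fuel l.length (l.dropWhile (· = c)) (l.dropWhile (· = c)).length
    (List.length_dropWhile_le _ l) le_rfl

theorem procC_dropDots (l : List Char) :
    procC (l.dropWhile (· = '.')) = procC l := by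
  cases l with
  | nil => rfl
  | cons c t =>
      by_cases h : c = '.'
      · subst h
        rw [List.dropWhile_cons]
        simp only [decide_true, if_true]
        rw [procC_cons, if_pos rfl, empty_append_str]
      · rw [List.dropWhile_cons]
        simp [h]

-- reference run-length encoding of a code list
def rle : List Char → List (Nat × Char)
  | [] => []
  | c :: rest => (1 + (rest.takeWhile (· = c)).length, c) :: rle (rest.dropWhile (· = c))
termination_by l => l.length
decreasing_by
  have := List.length_dropWhile_le (· = c) rest
  simp only [List.length_cons]
  omega

theorem rle_nil : rle [] = [] := by rw [rle]

theorem rle_cons (c : Char) (rest : List Char) :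
    rle (c :: rest) = (1 + (rest.takeWhile (· = c)).length, c) :: rle (rest.dropWhile (· = c)) := by
  rw [rle]

theorem rle_ne_nil (c : Char) (rest : List Char) : rle (c :: rest) ≠ [] := by
  rw [rle_cons]; simp

theorem mergeRuns_nil_left (r : List (Nat × Char)) : mergeRuns [] r = r := by
  unfold mergeRuns
  cases r <;> simp

theorem mergeRuns_nil_right (l : List (Nat × Char)) : mergeRuns l [] = l := by
  unfold mergeRuns
  cases h : l.getLast? <;> simp

theorem mergeRuns_cons (x : Nat × Char) (L R : List (Nat × Char)) (hL : L ≠ []) :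
    mergeRuns (x :: L) R = x :: mergeRuns L R := by
  unfold mergeRuns
  cases L with
  | nil => exact absurd rfl hL
  | cons y ys =>
      rw [List.getLast?_cons (l := y :: ys)]
      rw [List.getLast?_cons (l := ys) (a := y)]
      cases R with
      | nil => simp
      | cons r0 rtl =>
          by_cases h : ((ys.getLast?.getD y)).2 = r0.2
          · simp [h, List.dropLast_cons₂]
          · simp [h]

theorem rle_append : ∀ (n : Nat) (a b : List Char), a.length ≤ n →
    rle (a ++ b) = mergeRuns (rle a) (rle b) := by
  intro n
  induction n with
  | zero =>
      intro a b h
      have : a = [] := by cases a with | nil => rfl | cons c t => simp at h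
      subst this
      rw [List.nil_append, rle_nil, mergeRuns_nil_left]
  | succ n ih =>
      intro a b h
      cases a with
      | nil => rw [List.nil_append, rle_nil, mergeRuns_nil_left]
      | cons c rest =>
          simp only [List.length_cons] at h
          rw [List.cons_append, rle_cons, rle_cons]
          by_cases hrest : (rest.dropWhile (· = c)).isEmpty = true
          · -- rest consists only of c's
            rw [List.isEmpty_iff] at hrest
            have htw : rest.takeWhile (· = c) = rest :=
              List.takeWhile_eq_self_iff.mpr (List.dropWhile_eq_nil_iff.mp hrest)
            rw [List.takeWhile_append, List.dropWhile_append,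
              if_pos (by rw [htw]),
              if_pos (by rw [List.isEmpty_iff]; exact hrest), htw, hrest, rle_nil]
            cases b with
            | nil =>
                rw [rle_nil, mergeRuns_nil_right]
                simp [rle_nil]
            | cons b0 bt =>
                rw [rle_cons b0 bt]
                by_cases hb : b0 = c
                · subst hb
                  rw [List.takeWhile_cons, List.dropWhile_cons]
                  simp only [decide_true, if_true]
                  simp [mergeRuns]
                  omega
                · have hcb : ¬ c = b0 := fun h => hb h.symm
                  rw [List.takeWhile_cons, List.dropWhile_cons]
                  simp only [hb, decide_false, Bool.false_eq_true, if_false]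
                  rw [rle_cons b0 bt]
                  simp [mergeRuns, hcb]
          · -- rest contains a non-c element
            rw [List.isEmpty_iff] at hrest
            have hlen : ¬ (rest.takeWhile (· = c)).length = rest.length := by
              intro he
              have hd := dropWhile_eq_drop (· = c) rest
              rw [he, List.drop_length] at hd
              exact hrest hd
            rw [List.takeWhile_append, List.dropWhile_append, if_neg hlen,
              if_neg (by rw [List.isEmpty_iff]; exact hrest)]
            have hrec : (rest.dropWhile (· = c)).length ≤ n := by
              have := List.length_dropWhile_le (· = c) rest
              omega
            rw [ih (rest.dropWhile (· = c)) b hrec]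
            cases hdw : rest.dropWhile (· = c) with
            | nil => exact absurd hdw hrest
            | cons d dt =>
                rw [mergeRuns_cons _ _ _ (rle_ne_nil d dt)]

-- Source B's runs equals the run-length encoding of the code list
theorem dcRuns_eq (rd rf : List Char) : ∀ (n lo hi : Nat), hi - lo ≤ n →
    dcRuns rd rf lo hi = rle (cfrom rd rf hi lo) := by
  intro n
  induction n with
  | zero =>
      intro lo hi h
      rw [dcRuns, if_pos (by omega), cfrom_nil rd rf hi lo (by omega), rle_nil]
  | succ n ih =>
      intro lo hi h
      rw [dcRuns]
      by_cases h0 : hi - lo = 0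
      · rw [if_pos h0, cfrom_nil rd rf hi lo (by omega), rle_nil]
      · rw [if_neg h0]
        by_cases h1 : hi - lo = 1
        · rw [if_pos h1, cfrom_cons rd rf hi lo (by omega),
            cfrom_nil rd rf hi (lo + 1) (by omega), rle_cons]
          simp [codeAt, rle_nil]
        · rw [if_neg h1]
          have hm1 : lo < (lo + hi) / 2 := by omega
          have hm2 : (lo + hi) / 2 < hi := by omega
          rw [ih lo ((lo + hi) / 2) (by omega), ih ((lo + hi) / 2) hi (by omega),
            ← rle_append (cfrom rd rf ((lo + hi) / 2) lo).length _ _ le_rfl,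
            cfrom_split rd rf lo ((lo + hi) / 2) hi (by omega) (by omega)]

-- formatting the non-marker runs equals procC
theorem rle_format : ∀ (n : Nat) (l : List Char), l.length ≤ n →
    String.join (((rle l).filter (fun p => p.2 != '.')).map
      (fun p => PySem.Int.toStr (p.1 : Int) ++ String.singleton p.2)) = procC l := by
  intro n
  induction n with
  | zero =>
      intro l h
      have : l = [] := by cases l with | nil => rfl | cons a t => simp at h
      subst this
      rw [rle_nil, procC_nil]
      rfl
  | succ n ih =>
      intro l h
      cases l with
      | nil => rw [rle_nil, procC_nil]; rfl
      | cons c rest =>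
          simp only [List.length_cons] at h
          have hrec : (rest.dropWhile (· = c)).length ≤ n := by
            have := List.length_dropWhile_le (· = c) rest
            omega
          rw [rle_cons, procC_cons, List.filter_cons]
          by_cases hc : c = '.'
          · subst hc
            have hf : (((1 + (rest.takeWhile (· = '.')).length, '.') : Nat × Char).2 != '.')
                = false := rfl
            rw [hf, if_neg (by simp), if_pos rfl, ih _ hrec, empty_append_str]
          · rw [if_pos (by simpa using hc), if_neg hc, List.map_cons, join_cons, ih _ hrec]

-- codeAt bridges
theorem codeAt_dot (rd rf : List Char) (i : Nat) :
    codeAt rd rf i = '.' ↔ (rd.getD i ' ' = '-' ∧ rf.getD i ' ' = '-') := by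
  unfold codeAt; split_ifs <;> simp_all
theorem codeAt_D (rd rf : List Char) (i : Nat) :
    codeAt rd rf i = 'D' ↔ (rd.getD i ' ' = '-' ∧ rf.getD i ' ' ≠ '-') := by
  unfold codeAt; split_ifs <;> simp_all
theorem codeAt_I (rd rf : List Char) (i : Nat) :
    codeAt rd rf i = 'I' ↔ (rf.getD i ' ' = '-' ∧ rd.getD i ' ' ≠ '-') := by
  unfold codeAt; split_ifs <;> simp_all
theorem codeAt_M (rd rf : List Char) (i : Nat) :
    codeAt rd rf i = 'M' ↔ (rf.getD i ' ' ≠ '-' ∧ rd.getD i ' ' ≠ '-') := by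
  unfold codeAt; split_ifs <;> simp_all

theorem cigarLoopD_eq (rd rf : List Char) (limit : Nat) : ∀ (fuel i : Nat), limit - i ≤ fuel →
    cigarLoopD rd rf limit fuel i = i + ((cfrom rd rf limit i).takeWhile (· = 'D')).length := by
  intro fuel
  induction fuel with
  | zero =>
      intro i hf
      rw [cigarLoopD, cfrom_nil rd rf limit i (by omega)]
      simp
  | succ fuel ih =>
      intro i hf
      rw [cigarLoopD]
      by_cases h : i < limit ∧ rd.getD i ' ' = '-' ∧ rf.getD i ' ' ≠ '-'
      · rw [if_pos h, ih (i + 1) (by omega), cfrom_cons rd rf limit i h.1]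
        have hc : codeAt rd rf i = 'D' := (codeAt_D rd rf i).mpr h.2
        simp [hc]; omega
      · rw [if_neg h]
        by_cases hi : i < limit
        · rw [cfrom_cons rd rf limit i hi]
          have hc : codeAt rd rf i ≠ 'D' := by
            intro hc; exact h ⟨hi, ((codeAt_D rd rf i).mp hc)⟩
          simp [hc]
        · rw [cfrom_nil rd rf limit i hi]; simp

theorem cigarLoopI_eq (rd rf : List Char) (limit : Nat) : ∀ (fuel i : Nat), limit - i ≤ fuel →
    cigarLoopI rd rf limit fuel i = i + ((cfrom rd rf limit i).takeWhile (· = 'I')).length := by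
  intro fuel
  induction fuel with
  | zero =>
      intro i hf
      rw [cigarLoopI, cfrom_nil rd rf limit i (by omega)]
      simp
  | succ fuel ih =>
      intro i hf
      rw [cigarLoopI]
      by_cases h : i < limit ∧ rf.getD i ' ' = '-' ∧ rd.getD i ' ' ≠ '-'
      · rw [if_pos h, ih (i + 1) (by omega), cfrom_cons rd rf limit i h.1]
        have hc : codeAt rd rf i = 'I' := (codeAt_I rd rf i).mpr h.2
        simp [hc]; omega
      · rw [if_neg h]
        by_cases hi : i < limit
        · rw [cfrom_cons rd rf limit i hi]
          have hc : codeAt rd rf i ≠ 'I' := by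
            intro hc; exact h ⟨hi, ((codeAt_I rd rf i).mp hc)⟩
          simp [hc]
        · rw [cfrom_nil rd rf limit i hi]; simp

theorem cigarLoopM_eq (rd rf : List Char) (limit : Nat) : ∀ (fuel i : Nat), limit - i ≤ fuel →
    cigarLoopM rd rf limit fuel i = i + ((cfrom rd rf limit i).takeWhile (· = 'M')).length := by
  intro fuel
  induction fuel with
  | zero =>
      intro i hf
      rw [cigarLoopM, cfrom_nil rd rf limit i (by omega)]
      simp
  | succ fuel ih =>
      intro i hf
      rw [cigarLoopM]
      by_cases h : i < limit ∧ rf.getD i ' ' ≠ '-' ∧ rd.getD i ' ' ≠ '-'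
      · rw [if_pos h, ih (i + 1) (by omega), cfrom_cons rd rf limit i h.1]
        have hc : codeAt rd rf i = 'M' := (codeAt_M rd rf i).mpr h.2
        simp [hc]; omega
      · rw [if_neg h]
        by_cases hi : i < limit
        · rw [cfrom_cons rd rf limit i hi]
          have hc : codeAt rd rf i ≠ 'M' := by
            intro hc; exact h ⟨hi, ((codeAt_M rd rf i).mp hc)⟩
          simp [hc]
        · rw [cfrom_nil rd rf limit i hi]; simp

theorem cigarLoop_eq (rd rf : List Char) (limit : Nat) : ∀ (fuel i : Nat) (acc : String),
    limit - i ≤ fuel →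
    cigarLoop rd rf limit fuel i acc = acc ++ procC (cfrom rd rf limit i) := by
  intro fuel
  induction fuel with
  | zero =>
      intro i acc hf
      rw [cigarLoop, cfrom_nil rd rf limit i (by omega), procC_nil]
      simp
  | succ fuel ih =>
      intro i acc hf
      rw [cigarLoop]
      by_cases hi : i < limit
      · rw [if_pos hi]
        by_cases hboth : rd.getD i ' ' = '-' ∧ rf.getD i ' ' = '-'
        · rw [if_pos hboth, ih (i + 1) acc (by omega)]
          have hc : codeAt rd rf i = '.' := (codeAt_dot rd rf i).mpr hboth
          rw [cfrom_cons rd rf limit i hi, procC_cons, if_pos hc, hc,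
            procC_dropDots, empty_append_str]
        · rw [if_neg hboth]
          by_cases hd : rd.getD i ' ' = '-'
          · -- D branch
            rw [if_pos hd]
            have hrf : rf.getD i ' ' ≠ '-' := fun hc => hboth ⟨hd, hc⟩
            have hc : codeAt rd rf i = 'D' := (codeAt_D rd rf i).mpr ⟨hd, hrf⟩
            have hj := cigarLoopD_eq rd rf limit (limit - i) i le_rfl
            rw [cfrom_cons rd rf limit i hi, List.takeWhile_cons, hc] at hj
            simp only [decide_true, if_true, List.length_cons] at hj
            set k : Nat := ((cfrom rd rf limit (i + 1)).takeWhile (· = 'D')).length with hk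
            rw [ih (cigarLoopD rd rf limit (limit - i) i) _ (by omega)]
            rw [cfrom_cons rd rf limit i hi, procC_cons, if_neg (by rw [hc]; decide), hc]
            have hnum : ((cigarLoopD rd rf limit (limit - i) i : Int) - (i : Int))
                = ((1 + k : Nat) : Int) := by
              rw [hj]; push_cast; ring
            have hdrop : cfrom rd rf limit (cigarLoopD rd rf limit (limit - i) i)
                = (cfrom rd rf limit (i + 1)).dropWhile (· = 'D') := by
              rw [dropWhile_eq_drop, ← hk, ← cfrom_add rd rf limit k (i + 1)]
              congr 1; omega
            rw [hnum, hdrop, ← hk]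
            simp [String.append_assoc]
            rw [show ("D" : String) = String.singleton 'D' from by decide,
              ← String.append_assoc, String.append_singleton]
          · rw [if_neg hd]
            by_cases hf2 : rf.getD i ' ' = '-'
            · -- I branch
              rw [if_pos hf2]
              have hc : codeAt rd rf i = 'I' := (codeAt_I rd rf i).mpr ⟨hf2, hd⟩
              have hj := cigarLoopI_eq rd rf limit (limit - i) i le_rfl
              rw [cfrom_cons rd rf limit i hi, List.takeWhile_cons, hc] at hj
              simp only [decide_true, if_true, List.length_cons] at hj
              set k : Nat := ((cfrom rd rf limit (i + 1)).takeWhile (· = 'I')).length with hk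
              rw [ih (cigarLoopI rd rf limit (limit - i) i) _ (by omega)]
              rw [cfrom_cons rd rf limit i hi, procC_cons, if_neg (by rw [hc]; decide), hc]
              have hnum : ((cigarLoopI rd rf limit (limit - i) i : Int) - (i : Int))
                  = ((1 + k : Nat) : Int) := by
                rw [hj]; push_cast; ring
              have hdrop : cfrom rd rf limit (cigarLoopI rd rf limit (limit - i) i)
                  = (cfrom rd rf limit (i + 1)).dropWhile (· = 'I') := by
                rw [dropWhile_eq_drop, ← hk, ← cfrom_add rd rf limit k (i + 1)]
                congr 1; omega
              rw [hnum, hdrop, ← hk]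
              simp [String.append_assoc]
              rw [show ("I" : String) = String.singleton 'I' from by decide,
                ← String.append_assoc, String.append_singleton]
            · -- M branch
              rw [if_neg hf2]
              have hc : codeAt rd rf i = 'M' := (codeAt_M rd rf i).mpr ⟨hf2, hd⟩
              have hj := cigarLoopM_eq rd rf limit (limit - i) i le_rfl
              rw [cfrom_cons rd rf limit i hi, List.takeWhile_cons, hc] at hj
              simp only [decide_true, if_true, List.length_cons] at hj
              set k : Nat := ((cfrom rd rf limit (i + 1)).takeWhile (· = 'M')).length with hk
              rw [ih (cigarLoopM rd rf limit (limit - i) i) _ (by omega)]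
              rw [cfrom_cons rd rf limit i hi, procC_cons, if_neg (by rw [hc]; decide), hc]
              have hnum : ((cigarLoopM rd rf limit (limit - i) i : Int) - (i : Int))
                  = ((1 + k : Nat) : Int) := by
                rw [hj]; push_cast; ring
              have hdrop : cfrom rd rf limit (cigarLoopM rd rf limit (limit - i) i)
                  = (cfrom rd rf limit (i + 1)).dropWhile (· = 'M') := by
                rw [dropWhile_eq_drop, ← hk, ← cfrom_add rd rf limit k (i + 1)]
                congr 1; omega
              rw [hnum, hdrop, ← hk]
              simp [String.append_assoc]
              rw [show ("M" : String) = String.singleton 'M' from by decide,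
                ← String.append_assoc, String.append_singleton]
      · rw [if_neg hi, cfrom_nil rd rf limit i hi, procC_nil]
        simp

-- ===== VERDICT (by name: the statement is the Claim_ definition above) =====
theorem cigar_spec : Claim_equal_cigar := by
  intro read ref _ _
  unfold Spec_cigar cigar cigar_alt
  rw [cigarLoop_eq read.toList ref.toList read.toList.length read.toList.length 0 ""
      (by omega), empty_append_str,
    dcRuns_eq read.toList ref.toList read.toList.length 0 read.toList.length (by omega),
    rle_format (cfrom read.toList ref.toList read.toList.length 0).length _ le_rfl]
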